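-- pv_equiv track=rewrite | github.com/dfinson/codeplane | src/codeplane/mcp/tools/capabilities.py | _derive_features
-- ===== SOURCE A (Python) =====
-- def _derive_features(tool_names: list[str]) -> list[str]:
--     """Derive feature categories from registered tool names."""
--     features: set[str] = set()
--
--     for name in tool_names:
--         # Handle underscore-namespaced format (domain_action)
--         if name.startswith("git_"):
--             features.add("git_ops")
--         elif name.startswith("refactor_"):
--             features.add("refactoring")
--         elif name.startswith("session_"):
--             features.add("session_management")
--         elif name.startswith("testing_"):
--             features.add("testing")
--         elif name.startswith("lint_"):
--             features.add("linting")
--         elif name.startswith("index_"):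
--             features.add("indexing")
--         elif name.startswith("files_"):
--             features.add("file_ops")
--         elif name.startswith("meta_"):
--             features.add("introspection")
--
--     return sorted(features)
-- ===== SOURCE B (Python) =====
-- # Per-feature table scan: iterate a table pre-sorted by feature name and emit
-- # each feature whose prefix matches any tool name; output is built directly in
-- # sorted order, so no set and no final sort are needed.
-- _FEATURE_TABLE = [  # ordered by feature name
--     ("files_", "file_ops"),
--     ("git_", "git_ops"),
--     ("index_", "indexing"),
--     ("meta_", "introspection"),
--     ("lint_", "linting"),
--     ("refactor_", "refactoring"),
--     ("session_", "session_management"),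
--     ("testing_", "testing"),
-- ]
--
--
-- def _derive_features(tool_names: list[str]) -> list[str]:
--     """Derive feature categories from registered tool names."""
--     return [
--         feature
--         for prefix, feature in _FEATURE_TABLE
--         if any(name.startswith(prefix) for name in tool_names)
--     ]
-- ===== Notes on version B (the rewrite author's own statement) =====
-- stated objective: alternative
-- what changed: B inverts the loop structure: instead of A's per-name pass building a set via an eight-way startswith chain and then sorting it, B scans a fixed feature table pre-ordered by feature name and emits each feature for which any tool name carries its prefix, producing the sorted output directly with no set and no sort.
import Mathlib
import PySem

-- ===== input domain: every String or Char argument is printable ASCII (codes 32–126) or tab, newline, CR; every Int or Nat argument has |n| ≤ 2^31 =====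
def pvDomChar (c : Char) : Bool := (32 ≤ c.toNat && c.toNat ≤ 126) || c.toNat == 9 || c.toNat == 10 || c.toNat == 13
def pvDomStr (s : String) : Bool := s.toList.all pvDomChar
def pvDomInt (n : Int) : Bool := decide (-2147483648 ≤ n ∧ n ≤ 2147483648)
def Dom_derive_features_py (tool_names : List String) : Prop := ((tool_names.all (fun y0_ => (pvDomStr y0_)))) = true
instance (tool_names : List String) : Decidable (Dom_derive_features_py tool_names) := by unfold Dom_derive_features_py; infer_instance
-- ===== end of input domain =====

-- B inverts A's loop structure: a scan of a fixed feature table pre-ordered by feature name,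
-- emitting each feature whose prefix matches any tool name, builds the sorted output directly
-- with no set and no sort (objective: alternative).

-- ===== PORT A =====
def derive_features_py (tool_names : List String) : List String :=
  let features : PySem.Set String :=
    tool_names.foldl (fun features name =>
      if PySem.Str.startswith name "git_" then PySem.Set.add features "git_ops"
      else if PySem.Str.startswith name "refactor_" then PySem.Set.add features "refactoring"
      else if PySem.Str.startswith name "session_" then PySem.Set.add features "session_management"
      else if PySem.Str.startswith name "testing_" then PySem.Set.add features "testing"
      else if PySem.Str.startswith name "lint_" then PySem.Set.add features "linting"
      else if PySem.Str.startswith name "index_" then PySem.Set.add features "indexing"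
      else if PySem.Str.startswith name "files_" then PySem.Set.add features "file_ops"
      else if PySem.Str.startswith name "meta_" then PySem.Set.add features "introspection"
      else features) PySem.Set.empty
  PySem.List.sorted features (fun x => x) false

-- ===== PORT B =====
def featureTable : List (String × String) :=
  [("files_", "file_ops"), ("git_", "git_ops"), ("index_", "indexing"),
   ("meta_", "introspection"), ("lint_", "linting"), ("refactor_", "refactoring"),
   ("session_", "session_management"), ("testing_", "testing")]

def derive_features_py_alt (tool_names : List String) : List String :=
  (featureTable.filter (fun pf =>
    tool_names.any (fun name => PySem.Str.startswith name pf.1))).map (fun pf => pf.2)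

-- ===== PRECONDITION & SPEC =====
def Spec_derive_features_py (tool_names : List String) (out : List String) : Prop := out = derive_features_py_alt tool_names
instance (tool_names : List String) (out : List String) : Decidable (Spec_derive_features_py tool_names out) := by unfold Spec_derive_features_py; infer_instance

-- ===== CLAIM (what is proved, stated in full; the proofs are below) =====
def Claim_equal_derive_features_py : Prop := ∀ (tool_names : List String), Dom_derive_features_py tool_names → Spec_derive_features_py tool_names (derive_features_py tool_names)

-- ===== LEMMAS AND PROOFS =====

-- A's chain, read as a partial map from a name to the feature it contributes
def trigger (name : String) : Option String :=
  if PySem.Str.startswith name "git_" then some "git_ops"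
  else if PySem.Str.startswith name "refactor_" then some "refactoring"
  else if PySem.Str.startswith name "session_" then some "session_management"
  else if PySem.Str.startswith name "testing_" then some "testing"
  else if PySem.Str.startswith name "lint_" then some "linting"
  else if PySem.Str.startswith name "index_" then some "indexing"
  else if PySem.Str.startswith name "files_" then some "file_ops"
  else if PySem.Str.startswith name "meta_" then some "introspection"
  else none

lemma step_eq_trigger (s : PySem.Set String) (name : String) :
    (if PySem.Str.startswith name "git_" then PySem.Set.add s "git_ops"
      else if PySem.Str.startswith name "refactor_" then PySem.Set.add s "refactoring"
      else if PySem.Str.startswith name "session_" then PySem.Set.add s "session_management"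
      else if PySem.Str.startswith name "testing_" then PySem.Set.add s "testing"
      else if PySem.Str.startswith name "lint_" then PySem.Set.add s "linting"
      else if PySem.Str.startswith name "index_" then PySem.Set.add s "indexing"
      else if PySem.Str.startswith name "files_" then PySem.Set.add s "file_ops"
      else if PySem.Str.startswith name "meta_" then PySem.Set.add s "introspection"
      else s)
    = (match trigger name with
       | some f => PySem.Set.add s f
       | none => s) := by
  unfold trigger; split_ifs <;> rfl

-- two incomparable-as-lists prefixes cannot both start the same string
lemma sw_excl {n p q : String} (h1 : ¬ p.toList <+: q.toList) (h2 : ¬ q.toList <+: p.toList)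
    (hs : PySem.Str.startswith n p = true) : ¬ PySem.Str.startswith n q = true := by
  intro hq
  rw [PySem.Str.startswith_eq, PySem.Chars.startswith_iff] at hs hq
  rcases List.prefix_or_prefix_of_prefix hs hq with h | h
  · exact h1 h
  · exact h2 h

lemma trigger_iff (n y : String) :
    trigger n = some y ↔ ∃ pf ∈ featureTable, PySem.Str.startswith n pf.1 = true ∧ y = pf.2 := by
  constructor
  · unfold trigger
    split_ifs with h1 h2 h3 h4 h5 h6 h7 h8 <;> intro hy <;>
      simp only [Option.some.injEq] at hy <;> subst hy
    · exact ⟨("git_", "git_ops"), by simp [featureTable], h1, rfl⟩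
    · exact ⟨("refactor_", "refactoring"), by simp [featureTable], h2, rfl⟩
    · exact ⟨("session_", "session_management"), by simp [featureTable], h3, rfl⟩
    · exact ⟨("testing_", "testing"), by simp [featureTable], h4, rfl⟩
    · exact ⟨("lint_", "linting"), by simp [featureTable], h5, rfl⟩
    · exact ⟨("index_", "indexing"), by simp [featureTable], h6, rfl⟩
    · exact ⟨("files_", "file_ops"), by simp [featureTable], h7, rfl⟩
    · exact ⟨("meta_", "introspection"), by simp [featureTable], h8, rfl⟩
  · rintro ⟨pf, hmem, hsw, hy⟩
    subst hy
    unfold trigger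
    fin_cases hmem <;> simp only
    · rw [if_neg (sw_excl (by decide) (by decide) hsw),
        if_neg (sw_excl (by decide) (by decide) hsw),
        if_neg (sw_excl (by decide) (by decide) hsw),
        if_neg (sw_excl (by decide) (by decide) hsw),
        if_neg (sw_excl (by decide) (by decide) hsw),
        if_neg (sw_excl (by decide) (by decide) hsw),
        if_pos hsw]
    · rw [if_pos hsw]
    · rw [if_neg (sw_excl (by decide) (by decide) hsw),
        if_neg (sw_excl (by decide) (by decide) hsw),
        if_neg (sw_excl (by decide) (by decide) hsw),
        if_neg (sw_excl (by decide) (by decide) hsw),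
        if_neg (sw_excl (by decide) (by decide) hsw),
        if_pos hsw]
    · rw [if_neg (sw_excl (by decide) (by decide) hsw),
        if_neg (sw_excl (by decide) (by decide) hsw),
        if_neg (sw_excl (by decide) (by decide) hsw),
        if_neg (sw_excl (by decide) (by decide) hsw),
        if_neg (sw_excl (by decide) (by decide) hsw),
        if_neg (sw_excl (by decide) (by decide) hsw),
        if_neg (sw_excl (by decide) (by decide) hsw),
        if_pos hsw]
    · rw [if_neg (sw_excl (by decide) (by decide) hsw),
        if_neg (sw_excl (by decide) (by decide) hsw),
        if_neg (sw_excl (by decide) (by decide) hsw),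
        if_neg (sw_excl (by decide) (by decide) hsw),
        if_pos hsw]
    · rw [if_neg (sw_excl (by decide) (by decide) hsw),
        if_pos hsw]
    · rw [if_neg (sw_excl (by decide) (by decide) hsw),
        if_neg (sw_excl (by decide) (by decide) hsw),
        if_pos hsw]
    · rw [if_neg (sw_excl (by decide) (by decide) hsw),
        if_neg (sw_excl (by decide) (by decide) hsw),
        if_neg (sw_excl (by decide) (by decide) hsw),
        if_pos hsw]

lemma mem_foldl_trigger (y : String) :
    ∀ (l : List String) (s : PySem.Set String),
      (y ∈ l.foldl (fun s n => match trigger n with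
          | some f => PySem.Set.add s f
          | none => s) s)
      ↔ y ∈ s ∨ ∃ n ∈ l, trigger n = some y := by
  intro l
  induction l with
  | nil => intro s; simp
  | cons n t ih =>
    intro s
    cases htr : trigger n with
    | none =>
      simp only [List.foldl_cons, htr, ih, List.mem_cons]
      constructor
      · rintro (h | ⟨m, hm, h⟩)
        · exact Or.inl h
        · exact Or.inr ⟨m, Or.inr hm, h⟩
      · rintro (h | ⟨m, hm | hm, h⟩)
        · exact Or.inl h
        · subst hm; rw [h] at htr; exact absurd htr (by simp)
        · exact Or.inr ⟨m, hm, h⟩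
    | some f =>
      simp only [List.foldl_cons, htr, ih, PySem.Set.mem_add, List.mem_cons]
      constructor
      · rintro ((h | h) | h)
        · exact Or.inl h
        · exact Or.inr ⟨n, Or.inl rfl, by rw [htr, h]⟩
        · rcases h with ⟨m, hm, h⟩; exact Or.inr ⟨m, Or.inr hm, h⟩
      · rintro (h | ⟨m, hm | hm, h⟩)
        · exact Or.inl (Or.inl h)
        · subst hm; rw [h] at htr; simp at htr; exact Or.inl (Or.inr htr)
        · exact Or.inr ⟨m, hm, h⟩

lemma nodup_foldl_trigger :
    ∀ (l : List String) (s : PySem.Set String), s.Nodup →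
      (l.foldl (fun s n => match trigger n with
          | some f => PySem.Set.add s f
          | none => s) s).Nodup := by
  intro l
  induction l with
  | nil => intro s hs; simpa using hs
  | cons n t ih =>
    intro s hs
    simp only [List.foldl_cons]
    cases htr : trigger n with
    | none => exact ih s hs
    | some f => exact ih _ (PySem.Set.nodup_add s f hs)

lemma mem_alt (tool_names : List String) (y : String) :
    y ∈ derive_features_py_alt tool_names
      ↔ ∃ pf ∈ featureTable, (∃ n ∈ tool_names, PySem.Str.startswith n pf.1 = true) ∧ y = pf.2 := by
  simp only [derive_features_py_alt, List.mem_map, List.mem_filter, List.any_eq_true]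
  constructor
  · rintro ⟨pf, ⟨hmem, hany⟩, hy⟩; exact ⟨pf, hmem, hany, hy.symm⟩
  · rintro ⟨pf, hmem, hany, hy⟩; exact ⟨pf, ⟨hmem, hany⟩, hy.symm⟩

lemma alt_sublist (tool_names : List String) :
    (derive_features_py_alt tool_names).Sublist (featureTable.map (fun pf => pf.2)) :=
  List.Sublist.map _ List.filter_sublist

lemma nodup_alt (tool_names : List String) : (derive_features_py_alt tool_names).Nodup :=
  (List.Nodup.sublist (alt_sublist tool_names)
    (by decide : ((featureTable.map (fun pf => pf.2)).Nodup)))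

lemma pairwise_table :
    (featureTable.map (fun pf => pf.2)).Pairwise (fun a b : String => a < b) := by
  have h : (featureTable.map (fun pf => pf.2)).Pairwise
      (fun a b : String => a.toList < b.toList) := by decide
  exact h.imp (fun hab => String.lt_iff_toList_lt.mpr hab)

lemma pairwise_alt (tool_names : List String) :
    (derive_features_py_alt tool_names).Pairwise (fun a b : String => a < b) :=
  List.Pairwise.sublist (alt_sublist tool_names) pairwise_table

-- ===== VERDICT (by name: the statement is the Claim_ definition above) =====
theorem derive_features_py_spec : Claim_equal_derive_features_py := by
  intro tool_names _
  unfold Spec_derive_features_py derive_features_py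
  rw [show (fun (features : PySem.Set String) (name : String) =>
      if PySem.Str.startswith name "git_" then PySem.Set.add features "git_ops"
      else if PySem.Str.startswith name "refactor_" then PySem.Set.add features "refactoring"
      else if PySem.Str.startswith name "session_" then PySem.Set.add features "session_management"
      else if PySem.Str.startswith name "testing_" then PySem.Set.add features "testing"
      else if PySem.Str.startswith name "lint_" then PySem.Set.add features "linting"
      else if PySem.Str.startswith name "index_" then PySem.Set.add features "indexing"
      else if PySem.Str.startswith name "files_" then PySem.Set.add features "file_ops"
      else if PySem.Str.startswith name "meta_" then PySem.Set.add features "introspection"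
      else features)
    = (fun (s : PySem.Set String) (n : String) => match trigger n with
       | some f => PySem.Set.add s f
       | none => s)
    from funext fun s => funext fun n => step_eq_trigger s n]
  apply PySem.List.sorted_eq_of_perm_of_pairwise_lt
  · rw [List.perm_ext_iff_of_nodup (nodup_alt tool_names)
      (nodup_foldl_trigger tool_names PySem.Set.empty (by simp [PySem.Set.empty]))]
    intro y
    rw [mem_alt, mem_foldl_trigger]
    simp only [PySem.Set.empty, List.not_mem_nil, false_or]
    constructor
    · rintro ⟨pf, hmem, ⟨n, hn, hsw⟩, hy⟩
      exact ⟨n, hn, (trigger_iff n y).mpr ⟨pf, hmem, hsw, hy⟩⟩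
    · rintro ⟨n, hn, htr⟩
      rcases (trigger_iff n y).mp htr with ⟨pf, hmem, hsw, hy⟩
      exact ⟨pf, hmem, ⟨n, hn, hsw⟩, hy⟩
  · exact pairwise_alt tool_names
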